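-- pv_equiv track=rewrite | github.com/MachineLearningControl/OpenMLC-Python | MLC/Common/LispTreeExpr/LispTreeExpr.py | _number_of_subexpressions
-- ===== SOURCE A (Python) =====
-- def _number_of_subexpressions(expr):
--     level = 0
--     nbarg = 1
--     for i in range(len(expr)):
--         if expr[i] == '(':
--             level += 1
--         if expr[i] == ')':
--             level -= 1
--         if expr[i] == ' ' and level == 0:
--             nbarg += 1
--     return nbarg
-- ===== SOURCE B (Python) =====
-- def _number_of_subexpressions(expr):
--     # Word-level algorithm: split the string into space-separated segments once;
--     # the boundary after a segment is a top-level separator exactly when the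
--     # cumulative parenthesis balance of the segments before it is zero.
--     parts = expr.split(' ')
--     nbarg = 1
--     bal = 0
--     for part in parts[:-1]:
--         bal += part.count('(') - part.count(')')
--         if bal == 0:
--             nbarg += 1
--     return nbarg
-- ===== Notes on version B (the rewrite author's own statement) =====
-- stated objective: faster
-- what changed: Replaces A's per-character state machine with a word-level algorithm: the string is split once on spaces, and the loop walks the resulting segments, accumulating each segment's parenthesis balance via str.count and counting the boundaries where the cumulative balance is zero.
import Mathlib
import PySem

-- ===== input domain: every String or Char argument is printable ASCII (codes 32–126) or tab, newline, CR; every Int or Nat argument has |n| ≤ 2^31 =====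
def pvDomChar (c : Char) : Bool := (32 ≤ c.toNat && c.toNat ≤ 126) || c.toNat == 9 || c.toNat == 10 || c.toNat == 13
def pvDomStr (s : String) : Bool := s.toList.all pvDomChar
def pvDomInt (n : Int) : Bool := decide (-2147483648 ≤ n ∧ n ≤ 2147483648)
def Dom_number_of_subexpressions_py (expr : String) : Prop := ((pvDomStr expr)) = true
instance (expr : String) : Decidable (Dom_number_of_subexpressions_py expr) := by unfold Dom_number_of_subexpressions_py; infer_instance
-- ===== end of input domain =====

-- B replaces A's per-character state machine by a word-level pass: split on ' ' once,
-- then walk the segments accumulating each segment's paren balance; objective: faster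
-- (constant factor, measured).

-- ===== PORT A =====
-- A's loop over the characters, carrying (level, nbarg); branches in A's order.
def pvLoopA : List Char → Int → Int → Int
  | [], _, nbarg => nbarg
  | c :: cs, level, nbarg =>
    let l1 := if c = '(' then level + 1 else level
    let l2 := if c = ')' then l1 - 1 else l1
    let nb := if c = ' ' ∧ l2 = 0 then nbarg + 1 else nbarg
    pvLoopA cs l2 nb

def number_of_subexpressions_py (expr : String) : Int :=
  pvLoopA expr.toList 0 1

-- ===== PORT B =====
-- Source B's loop over parts[:-1], carrying (bal, nbarg); str.count via PySem.Str.count.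
def pvLoopB : List String → Int → Int → Int
  | [], _, nbarg => nbarg
  | w :: ws, bal, nbarg =>
    let b := bal + ((PySem.Str.count w "(" : Int) - (PySem.Str.count w ")" : Int))
    pvLoopB ws b (if b = 0 then nbarg + 1 else nbarg)

def number_of_subexpressions_py_alt (expr : String) : Int :=
  -- expr.split(' '): sep is non-empty, so split? always returns some; getD is a totality guard
  let parts := (PySem.Str.split? expr " ").getD []
  pvLoopB (PySem.List.slice parts none (some (-1))) 0 1

-- ===== PRECONDITION & SPEC =====
def Spec_number_of_subexpressions_py (expr : String) (out : Int) : Prop := out = number_of_subexpressions_py_alt expr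
instance (expr : String) (out : Int) : Decidable (Spec_number_of_subexpressions_py expr out) := by unfold Spec_number_of_subexpressions_py; infer_instance

-- ===== CLAIM (what is proved, stated in full; the proofs are below) =====
def Claim_equal_number_of_subexpressions_py : Prop := ∀ (expr : String), Dom_number_of_subexpressions_py expr → Spec_number_of_subexpressions_py expr (number_of_subexpressions_py expr)

-- ===== LEMMAS AND PROOFS =====

-- A structural model of str.split(' ') on char lists.
def pvSplitSp : List Char → List (List Char)
  | [] => [[]]
  | c :: cs =>
    if c = ' ' then [] :: pvSplitSp cs
    else
      match pvSplitSp cs with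
      | [] => [[c]]          -- unreachable: pvSplitSp never returns []
      | w :: ws => (c :: w) :: ws

theorem pvSplitSp_ne_nil (cs : List Char) : pvSplitSp cs ≠ [] := by
  cases cs with
  | nil => simp [pvSplitSp]
  | cons c cs =>
    simp only [pvSplitSp]
    split
    · simp
    · split <;> simp

-- prepend the current word onto the first segment
def pvPrep (w : List Char) : List (List Char) → List (List Char)
  | [] => [w]
  | x :: xs => (w ++ x) :: xs

theorem pv_go_split (cs : List Char) : ∀ (fuel : Nat) (cur : List Char) (acc : List (List Char)),
    cs.length ≤ fuel →
    PySem.Chars.splitOn.go [' '] fuel cs cur acc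
      = acc.reverse ++ pvPrep cur.reverse (pvSplitSp cs) := by
  induction cs with
  | nil =>
    intro fuel cur acc _
    cases fuel <;> simp [PySem.Chars.splitOn.go, pvSplitSp, pvPrep]
  | cons c cs ih =>
    intro fuel cur acc hf
    cases fuel with
    | zero => simp at hf
    | succ f =>
      by_cases hc : c = ' '
      · subst hc
        rw [show PySem.Chars.splitOn.go [' '] (f+1) (' ' :: cs) cur acc
              = PySem.Chars.splitOn.go [' '] f cs [] (cur.reverse :: acc) by
            simp [PySem.Chars.splitOn.go, List.isPrefixOf]]
        rw [ih f [] (cur.reverse :: acc) (by simpa using hf)]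
        rcases h : pvSplitSp cs with _ | ⟨w, ws⟩
        · exact absurd h (pvSplitSp_ne_nil cs)
        · simp [pvSplitSp, pvPrep, h]
      · rw [show PySem.Chars.splitOn.go [' '] (f+1) (c :: cs) cur acc
              = PySem.Chars.splitOn.go [' '] f cs (c :: cur) acc by
            simp [PySem.Chars.splitOn.go, List.isPrefixOf, Ne.symm hc]]
        rw [ih f (c :: cur) acc (by simpa using hf)]
        rcases h : pvSplitSp cs with _ | ⟨w, ws⟩
        · exact absurd h (pvSplitSp_ne_nil cs)
        · simp [pvSplitSp, pvPrep, h, hc]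

theorem pv_splitOn_eq (cs : List Char) : PySem.Chars.splitOn cs [' '] = pvSplitSp cs := by
  rw [PySem.Chars.splitOn, pv_go_split cs (cs.length + 1) [] [] (by omega)]
  rcases h : pvSplitSp cs with _ | ⟨w, ws⟩
  · exact absurd h (pvSplitSp_ne_nil cs)
  · simp [pvPrep]

-- single-character str.count is List.count
theorem pv_count_go (l : List Char) : ∀ (fuel : Nat) (c : Char) (acc : Nat),
    l.length ≤ fuel →
    PySem.Chars.count.go [c] fuel l acc = acc + l.count c := by
  induction l with
  | nil => intro fuel c acc _; cases fuel <;> simp [PySem.Chars.count.go]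
  | cons x l ih =>
    intro fuel c acc hf
    cases fuel with
    | zero => simp at hf
    | succ f =>
      by_cases hx : c = x
      · subst hx
        rw [show PySem.Chars.count.go [c] (f+1) (c :: l) acc
              = PySem.Chars.count.go [c] f l (acc + 1) by
            simp [PySem.Chars.count.go, List.isPrefixOf]]
        rw [ih f c (acc + 1) (by simpa using hf)]
        simp [List.count_cons]; omega
      · rw [show PySem.Chars.count.go [c] (f+1) (x :: l) acc
              = PySem.Chars.count.go [c] f l acc by
            simp [PySem.Chars.count.go, List.isPrefixOf, hx]]
        rw [ih f c acc (by simpa using hf)]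
        simp [List.count_cons, Ne.symm hx]

theorem pv_count_single (l : List Char) (c : Char) :
    PySem.Chars.count l [c] = l.count c := by
  rw [PySem.Chars.count]
  simp [pv_count_go l l.length c 0 le_rfl]

-- parts[:-1] is dropLast
theorem pv_slice_dropLast {α : Type} (xs : List α) :
    PySem.List.slice xs none (some (-1)) = xs.dropLast := by
  have hcl : PySem.List.clampIdx xs.length (-1) = xs.length - 1 := by
    unfold PySem.List.clampIdx
    split_ifs <;> omega
  simp [PySem.List.slice, hcl, List.dropLast_eq_take]

-- char-level model of B's loop
def pvLoopBC : List (List Char) → Int → Int → Int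
  | [], _, nbarg => nbarg
  | w :: ws, bal, nbarg =>
    let b := bal + ((w.count '(' : Int) - (w.count ')' : Int))
    pvLoopBC ws b (if b = 0 then nbarg + 1 else nbarg)

theorem pvLoopB_eq_BC (ws : List (List Char)) : ∀ (bal nbarg : Int),
    pvLoopB (ws.map String.ofList) bal nbarg = pvLoopBC ws bal nbarg := by
  induction ws with
  | nil => intro _ _; rfl
  | cons w ws ih =>
    intro bal nbarg
    simp only [List.map_cons, pvLoopB, pvLoopBC, PySem.Str.count_eq,
      String.toList_ofList, show ("(" : String).toList = ['('] from rfl,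
      show (")" : String).toList = [')'] from rfl, pv_count_single]
    exact ih _ _

-- per-character delta of A
def pvDelta (c : Char) : Int := if c = '(' then 1 else if c = ')' then -1 else 0

-- main invariant: A's char loop = B's word loop over the split (last word dropped)
theorem pvLoopA_eq (cs : List Char) : ∀ (level nbarg : Int),
    pvLoopA cs level nbarg = pvLoopBC ((pvSplitSp cs).dropLast) level nbarg := by
  induction cs with
  | nil => intro level nbarg; simp [pvLoopA, pvSplitSp, pvLoopBC]
  | cons c cs ih =>
    intro level nbarg
    have hl2 : (if c = ')' then (if c = '(' then level + 1 else level) - 1 else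
        (if c = '(' then level + 1 else level)) = level + pvDelta c := by
      by_cases h1 : c = '(' <;> by_cases h2 : c = ')' <;> simp_all [pvDelta] <;> omega
    by_cases hc : c = ' '
    · subst hc
      rcases h : pvSplitSp cs with _ | ⟨w, ws⟩
      · exact absurd h (pvSplitSp_ne_nil cs)
      · have hsp : pvSplitSp (' ' :: cs) = [] :: w :: ws := by
          simp [pvSplitSp, h]
        have hA : pvLoopA (' ' :: cs) level nbarg
            = pvLoopA cs level (if level = 0 then nbarg + 1 else nbarg) := by
          show pvLoopA cs
              (if (' ' : Char) = ')' then (if (' ' : Char) = '(' then level + 1 else level) - 1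
               else (if (' ' : Char) = '(' then level + 1 else level))
              (if (' ' : Char) = ' ' ∧ _ = 0 then nbarg + 1 else nbarg) = _
          rw [if_neg (by decide : ¬ (' ' : Char) = ')'), if_neg (by decide : ¬ (' ' : Char) = '(')]
          simp only [eq_self_iff_true, true_and]
        have hB : pvLoopBC ((pvSplitSp (' ' :: cs)).dropLast) level nbarg
            = pvLoopBC ((pvSplitSp cs).dropLast) level (if level = 0 then nbarg + 1 else nbarg) := by
          rw [hsp, h, List.dropLast_cons₂]
          show pvLoopBC (w :: ws).dropLast (level + (((0 : Nat) : Int) - ((0 : Nat) : Int)))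
              (if level + (((0 : Nat) : Int) - ((0 : Nat) : Int)) = 0 then nbarg + 1 else nbarg) = _
          norm_num
        rw [hA, hB, ih]
    · rcases h : pvSplitSp cs with _ | ⟨w, ws⟩
      · exact absurd h (pvSplitSp_ne_nil cs)
      · have hsplit : pvSplitSp (c :: cs) = (c :: w) :: ws := by
          simp [pvSplitSp, hc, h]
        simp only [pvLoopA, hl2]
        have hnb : (if c = ' ' ∧ level + pvDelta c = 0 then nbarg + 1 else nbarg) = nbarg := by
          simp [hc]
        rw [hnb, ih]
        rcases ws with _ | ⟨w1, ws⟩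
        · simp [hsplit, h, pvLoopBC]
        · have hcnt : ((c :: w).count '(' : Int) - ((c :: w).count ')' : Int)
              = pvDelta c + ((w.count '(' : Int) - (w.count ')' : Int)) := by
            by_cases h1 : c = '(' <;> by_cases h2 : c = ')' <;>
              simp_all [pvDelta, List.count_cons] <;> push_cast <;> omega
          simp only [hsplit, h, List.dropLast_cons₂, pvLoopBC, hcnt]
          ring_nf

-- ===== VERDICT (by name: the statement is the Claim_ definition above) =====
theorem number_of_subexpressions_py_spec : Claim_equal_number_of_subexpressions_py := by
  intro expr _
  unfold Spec_number_of_subexpressions_py number_of_subexpressions_py number_of_subexpressions_py_alt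
  have hsplit : PySem.Str.split? expr " "
      = some ((pvSplitSp expr.toList).map String.ofList) := by
    rw [PySem.Str.split?]
    rw [show (" " : String).toList = [' '] from rfl]
    simp [PySem.Chars.split?, pv_splitOn_eq]
  rw [hsplit]
  simp only [Option.getD_some]
  rw [pv_slice_dropLast, ← List.map_dropLast, pvLoopB_eq_BC, pvLoopA_eq]
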